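-- pv_equiv track=rewrite | github.com/tiagoberwanger/Projeto---Restaurant-Orders | src/analyze_log.py | days_without_order
-- ===== SOURCE A (Python) =====
-- def days_without_order(name, days):
--     all_days = set()
--     client_days = set()
--     for day in days:
--         all_days.add(day[2])
--     for client in days:
--         if client[0] == name:
--             client_days.add(client[2])
--     return all_days.difference(client_days)
-- ===== SOURCE B (Python) =====
-- def days_without_order(name, days):
--     index = {}
--     for day in days:
--         index.setdefault(day[2], set()).add(day[0])
--     return {d for d, clients in index.items() if name not in clients}
-- ===== Notes on version B (the rewrite author's own statement) =====
-- stated objective: alternative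
-- what changed: Builds one day->clients index dict in a single pass and filters its entries by membership, instead of building two independent day-sets in two passes and taking a set difference.
import Mathlib
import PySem

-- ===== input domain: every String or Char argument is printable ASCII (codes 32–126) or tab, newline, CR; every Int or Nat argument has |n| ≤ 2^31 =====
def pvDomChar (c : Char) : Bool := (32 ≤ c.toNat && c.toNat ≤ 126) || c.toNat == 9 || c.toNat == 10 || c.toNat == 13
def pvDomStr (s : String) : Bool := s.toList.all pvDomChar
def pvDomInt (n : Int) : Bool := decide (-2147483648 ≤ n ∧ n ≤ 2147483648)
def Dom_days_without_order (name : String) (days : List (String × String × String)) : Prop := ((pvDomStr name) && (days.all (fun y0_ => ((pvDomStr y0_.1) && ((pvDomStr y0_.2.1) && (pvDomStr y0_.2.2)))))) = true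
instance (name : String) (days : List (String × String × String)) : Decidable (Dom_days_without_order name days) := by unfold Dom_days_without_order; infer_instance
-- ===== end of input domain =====

-- B builds a single day→clients index dict in one pass and filters its entries by membership, instead of A's two day-sets and a set difference (alternative decomposition, same cost).

-- ===== PORT A =====
def days_without_order (name : String) (days : List (String × String × String)) : List String :=
  let all_days : PySem.Set String :=
    days.foldl (fun s day => PySem.Set.add s day.2.2) PySem.Set.empty
  let client_days : PySem.Set String :=
    days.foldl (fun s client => if client.1 == name then PySem.Set.add s client.2.2 else s) PySem.Set.empty
  PySem.Set.diff all_days client_days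

-- ===== PORT B =====
def days_without_order_alt (name : String) (days : List (String × String × String)) : List String :=
  let index : PySem.Dict String (PySem.Set String) :=
    days.foldl (fun d day => d.insert day.2.2 (PySem.Set.add (d.getD day.2.2 PySem.Set.empty) day.1)) PySem.Dict.empty
  PySem.Set.ofList ((index.items.filter (fun p => !(PySem.Set.contains p.2 name))).map Prod.fst)

-- ===== PRECONDITION & SPEC =====
def Spec_days_without_order (name : String) (days : List (String × String × String)) (out : List String) : Prop := out = days_without_order_alt name days
instance (name : String) (days : List (String × String × String)) (out : List String) : Decidable (Spec_days_without_order name days out) := by unfold Spec_days_without_order; infer_instance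

-- ===== CLAIM (what is proved, stated in full; the proofs are below) =====
def Claim_equal_days_without_order : Prop := ∀ (name : String) (days : List (String × String × String)), Dom_days_without_order name days → Spec_days_without_order name days (days_without_order name days)

-- ===== LEMMAS AND PROOFS =====

-- Joint invariant of B's index fold against A's client_days fold: keys are nodup,
-- an entry's client set holds `name` iff A's client set holds the entry's key,
-- and A's client set only holds keys of the index.
def pvInv (name : String) (C : PySem.Set String) (D : PySem.Dict String (PySem.Set String)) : Prop :=
  (D.items.map Prod.fst).Nodup ∧
  (∀ p ∈ D.items, (name ∈ p.2 ↔ p.1 ∈ C)) ∧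
  (∀ k ∈ C, k ∈ D.items.map Prod.fst)

theorem pvInv_step (name : String) (C : PySem.Set String) (D : PySem.Dict String (PySem.Set String))
    (d : String × String × String) (h : pvInv name C D) :
    pvInv name (if d.1 == name then PySem.Set.add C d.2.2 else C)
      (D.insert d.2.2 (PySem.Set.add (D.getD d.2.2 PySem.Set.empty) d.1)) := by
  obtain ⟨hnd, hmem, hsub⟩ := h
  have hC' : ∀ k, (k ∈ (if d.1 == name then PySem.Set.add C d.2.2 else C)) ↔ (k ∈ C ∨ (d.1 = name ∧ k = d.2.2)) := by
    intro k
    by_cases he : d.1 == name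
    · have hen : d.1 = name := eq_of_beq he
      simp only [he, if_pos, PySem.Set.mem_add]
      tauto
    · have hen : d.1 ≠ name := by simpa using he
      simp only [he, Bool.false_eq_true, if_neg, not_false_iff]
      constructor
      · exact Or.inl
      · rintro (h1 | ⟨h1, _⟩)
        · exact h1
        · exact absurd h1 hen
  by_cases hc : D.contains d.2.2 = true
  · -- key already present: the matching entry is overwritten in place
    obtain ⟨q, hfq⟩ : ∃ q, D.items.find? (fun p => p.1 == d.2.2) = some q := by
      rw [← Option.isSome_iff_exists, List.find?_isSome]
      simpa [PySem.Dict.contains] using hc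
    have hqmem : q ∈ D.items := List.mem_of_find?_eq_some hfq
    have hqkey : q.1 = d.2.2 := eq_of_beq (by simpa using List.find?_some hfq)
    have hgetD : D.getD d.2.2 PySem.Set.empty = q.2 := by
      simp [PySem.Dict.getD, PySem.Dict.get?, hfq]
    have hins : (D.insert d.2.2 (PySem.Set.add (D.getD d.2.2 PySem.Set.empty) d.1)).items
        = D.items.map (fun p => if p.1 == d.2.2 then (d.2.2, PySem.Set.add q.2 d.1) else p) := by
      unfold PySem.Dict.insert
      rw [if_pos hc, hgetD]
    have hkeys : ((D.insert d.2.2 (PySem.Set.add (D.getD d.2.2 PySem.Set.empty) d.1)).items.map Prod.fst)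
        = D.items.map Prod.fst := by
      rw [hins, List.map_map]
      apply List.map_congr_left
      intro p _
      by_cases hp : (p.1 == d.2.2) = true
      · simp [eq_of_beq hp]
      · have hne : p.1 ≠ d.2.2 := by simpa using hp
        simp [hne]
    refine ⟨by rw [hkeys]; exact hnd, ?_, ?_⟩
    · intro p' hp'
      rw [hins] at hp'
      obtain ⟨p, hp, rfl⟩ := List.mem_map.mp hp'
      by_cases hpk : p.1 == d.2.2
      · -- p' is the overwritten entry
        have hpq : p = q := by
          -- nodup keys: p and q have the same key, both in items
          have : p.1 = q.1 := by rw [eq_of_beq hpk, hqkey]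
          exact List.inj_on_of_nodup_map hnd hp hqmem (by simpa using this)
        simp only [hpk, if_pos]
        rw [hC' d.2.2]
        constructor
        · intro hn
          rcases (PySem.Set.mem_add q.2 d.1 name).mp hn with h1 | h1
          · exact Or.inl (hqkey ▸ (hmem q hqmem).mp h1)
          · exact Or.inr ⟨h1.symm, rfl⟩
        · intro hn
          apply (PySem.Set.mem_add q.2 d.1 name).mpr
          rcases hn with h1 | ⟨h1, _⟩
          · exact Or.inl ((hmem q hqmem).mpr (hqkey ▸ h1))
          · exact Or.inr h1.symm
      · -- p' = p unchanged
        simp only [hpk, if_neg, Bool.not_eq_true]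
        rw [hC' p.1]
        have hpne : p.1 ≠ d.2.2 := by simpa using hpk
        rw [hmem p hp]
        constructor
        · exact Or.inl
        · rintro (h1 | ⟨_, h2⟩)
          · exact h1
          · exact absurd h2 hpne
    · intro k hk
      rw [hkeys]
      rcases (hC' k).mp hk with h1 | ⟨_, rfl⟩
      · exact hsub k h1
      · rw [← hqkey]; exact List.mem_map_of_mem hqmem
  · -- new key: appended at the end with a fresh singleton client set
    have hnot : d.2.2 ∉ D.items.map Prod.fst := by
      simp only [PySem.Dict.contains, List.any_eq_true, not_exists] at hc
      intro hmemk
      obtain ⟨p, hp, hpe⟩ := List.mem_map.mp hmemk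
      exact hc p ⟨hp, by simp [hpe]⟩
    have hval : PySem.Set.add (D.getD d.2.2 PySem.Set.empty) d.1 = [d.1] := by
      have : D.getD d.2.2 PySem.Set.empty = PySem.Set.empty := by
        simp only [PySem.Dict.contains, List.any_eq_true] at hc
        have : D.items.find? (fun p => p.1 == d.2.2) = none := by
          rw [List.find?_eq_none]
          intro p hp
          exact fun hb => hc ⟨p, hp, hb⟩
        simp [PySem.Dict.getD, PySem.Dict.get?, this]
      rw [this]
      simp [PySem.Set.add, PySem.Set.contains, PySem.Set.empty]
    have hins : (D.insert d.2.2 (PySem.Set.add (D.getD d.2.2 PySem.Set.empty) d.1)).items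
        = D.items ++ [(d.2.2, [d.1])] := by
      unfold PySem.Dict.insert
      rw [if_neg hc, hval]
    refine ⟨?_, ?_, ?_⟩
    · rw [hins]
      simp only [List.map_append, List.map_cons, List.map_nil]
      exact List.Nodup.append hnd (List.nodup_singleton _) (by simpa [List.disjoint_singleton] using hnot)
    · intro p' hp'
      rw [hins, List.mem_append] at hp'
      rcases hp' with hp | hp
      · have hpne : p'.1 ≠ d.2.2 := fun he => hnot (he ▸ List.mem_map_of_mem hp)
        rw [hmem p' hp, hC' p'.1]
        constructor
        · exact Or.inl
        · rintro (h1 | ⟨_, h2⟩)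
          · exact h1
          · exact absurd h2 hpne
      · simp only [List.mem_singleton] at hp
        subst hp
        rw [hC' d.2.2]
        simp only [List.mem_singleton]
        constructor
        · intro hn; exact Or.inr ⟨hn.symm, by trivial⟩
        · rintro (h1 | ⟨h1, _⟩)
          · exact absurd (hsub _ h1) hnot
          · exact h1.symm
    · intro k hk
      rw [hins]
      simp only [List.map_append, List.map_cons, List.map_nil, List.mem_append, List.mem_singleton]
      rcases (hC' k).mp hk with h1 | ⟨_, rfl⟩
      · exact Or.inl (hsub k h1)
      · exact Or.inr rfl

theorem pvInv_foldl (name : String) (days : List (String × String × String))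
    (C : PySem.Set String) (D : PySem.Dict String (PySem.Set String)) (h : pvInv name C D) :
    pvInv name (days.foldl (fun s client => if client.1 == name then PySem.Set.add s client.2.2 else s) C)
      (days.foldl (fun d day => d.insert day.2.2 (PySem.Set.add (d.getD day.2.2 PySem.Set.empty) day.1)) D) := by
  induction days generalizing C D with
  | nil => exact h
  | cons d t ih => exact ih _ _ (pvInv_step name C D d h)

-- A list that is already nodup is its own set.
theorem pvOfList_nodup (l : List String) (h : l.Nodup) : PySem.Set.ofList l = l := by
  suffices haux : ∀ (l s : List String), (∀ x ∈ l, x ∉ s) → l.Nodup → l.foldl PySem.Set.add s = s ++ l by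
    simpa using haux l [] (by simp) h
  intro l
  induction l with
  | nil => intro s _ _; simp
  | cons x t ih =>
    intro s hdis hnd
    have hx : PySem.Set.add s x = s ++ [x] := by
      have hxs : x ∉ s := hdis x List.mem_cons_self
      simp [PySem.Set.add, PySem.Set.contains, hxs]
    simp only [List.foldl_cons, hx]
    rw [ih (s ++ [x]) ?_ (List.Nodup.of_cons hnd), List.append_assoc]
    · simp
    · intro y hy
      simp only [List.mem_append, List.mem_singleton, not_or]
      exact ⟨hdis y (List.mem_cons_of_mem _ hy), fun he => (List.nodup_cons.mp hnd).1 (he ▸ hy)⟩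

-- ===== VERDICT (by name: the statement is the Claim_ definition above) =====
theorem days_without_order_spec : Claim_equal_days_without_order := by
  intro name days _
  unfold Spec_days_without_order days_without_order days_without_order_alt
  simp only []
  set C := days.foldl (fun s client => if client.1 == name then PySem.Set.add s client.2.2 else s) PySem.Set.empty with hCdef
  set D := days.foldl (fun d day => d.insert day.2.2 (PySem.Set.add (d.getD day.2.2 PySem.Set.empty) day.1)) PySem.Dict.empty with hDdef
  have hinv : pvInv name C D := by
    rw [hCdef, hDdef]
    exact pvInv_foldl name days PySem.Set.empty PySem.Dict.empty ⟨by simp [PySem.Dict.empty], by simp [PySem.Dict.empty], by simp [PySem.Set.empty]⟩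
  obtain ⟨hnd, hmem, _⟩ := hinv
  -- A's all_days set equals the keys of B's index
  have hkeys : D.items.map Prod.fst = days.foldl (fun s day => PySem.Set.add s day.2.2) PySem.Set.empty := by
    have h1 : D.keys = PySem.Set.update PySem.Dict.empty.keys (days.map (fun day => day.2.2)) :=
      PySem.Dict.keys_foldl_insert_key days (fun day => day.2.2) (fun d day => PySem.Set.add (d.getD day.2.2 PySem.Set.empty) day.1) PySem.Dict.empty
    have h2 : D.items.map Prod.fst = D.keys := by simp [PySem.Dict.keys]
    rw [h2, h1]
    simp only [PySem.Set.update, PySem.Dict.empty, PySem.Dict.keys, List.map_nil, List.foldl_map]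
    rfl
  -- filter B's entries by the invariant, push the filter through the key projection
  have hfilt : D.items.filter (fun p => !(PySem.Set.contains p.2 name))
      = D.items.filter ((fun k => !(PySem.Set.contains C k)) ∘ Prod.fst) := by
    apply List.filter_congr
    intro p hp
    have := hmem p hp
    simp only [Function.comp_apply, PySem.Set.contains]
    rw [Bool.eq_iff_iff]
    simp [this]
  rw [hfilt, ← List.filter_map, hkeys,
    pvOfList_nodup _ (List.Nodup.filter _ (by rw [← hkeys]; exact hnd))]
  simp [PySem.Set.diff]
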